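-- pv_equiv track=rewrite | github.com/IzaacMammadov/AOC-2023 | Day 12/Problem1.py | is_valid_arrangement
-- ===== SOURCE A (Python) =====
-- def is_valid_arrangement(arrangement, groups):
--     """Checks if a certain arrangement of #s and .s matches up with the groupings we expect"""
--     groups_seen = []
--     current_streak = 0
--     for char in arrangement:
--         if char == "#":
--             current_streak += 1
--         elif current_streak:
--             groups_seen.append(current_streak)
--             current_streak = 0
--     if current_streak:
--         groups_seen.append(current_streak)
--     return groups_seen == groups
-- ===== SOURCE B (Python) =====
-- def is_valid_arrangement(arrangement, groups):
--     """Collect the positions of '#' characters, then check that `groups`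
--     partitions the position list into maximal consecutive blocks covering it."""
--     idxs = [i for i, c in enumerate(arrangement) if c == "#"]
--     pos = 0
--     for g in groups:
--         if g <= 0 or pos + g > len(idxs):
--             return False
--         if idxs[pos + g - 1] - idxs[pos] != g - 1:
--             return False
--         if pos > 0 and idxs[pos] - idxs[pos - 1] == 1:
--             return False
--         pos += g
--     return pos == len(idxs)
-- ===== Notes on version B (the rewrite author's own statement) =====
-- stated objective: alternative
-- what changed: Instead of scanning characters with a streak counter and two flush sites to build a run-length list, B first collects the positions of '#' characters and then iterates over the expected groups, verifying that each group carves off a consecutive, maximal block of positions and that all positions are consumed.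
import Mathlib
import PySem

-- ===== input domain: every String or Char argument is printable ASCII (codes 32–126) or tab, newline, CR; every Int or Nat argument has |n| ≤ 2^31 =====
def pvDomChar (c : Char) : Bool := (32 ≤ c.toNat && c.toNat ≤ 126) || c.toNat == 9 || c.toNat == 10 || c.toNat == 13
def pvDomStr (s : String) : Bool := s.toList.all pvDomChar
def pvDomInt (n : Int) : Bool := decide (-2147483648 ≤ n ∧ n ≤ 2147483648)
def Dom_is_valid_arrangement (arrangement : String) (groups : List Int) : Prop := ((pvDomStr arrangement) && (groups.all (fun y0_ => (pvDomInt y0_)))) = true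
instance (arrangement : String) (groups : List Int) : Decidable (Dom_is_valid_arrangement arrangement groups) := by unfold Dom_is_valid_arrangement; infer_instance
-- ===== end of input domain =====

-- B replaces A's streak-counter scan (building a run-length list, then one comparison) by a
-- position-based check: collect the indices of '#' and verify that `groups` partitions that
-- index list into maximal consecutive blocks covering all of it (objective: alternative).


-- ===== PORT A =====
-- one step of A's for-loop over the characters; state = (groups_seen, current_streak)
def pvStepA (p : List Int × Int) (ch : Char) : List Int × Int :=
  if ch = '#' then (p.1, p.2 + 1)
  else if p.2 ≠ 0 then (p.1 ++ [p.2], 0)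
  else p

-- A's flush-after-the-loop: 'if current_streak: groups_seen.append(current_streak)'
def pvFlushA (st : List Int × Int) : List Int :=
  if st.2 ≠ 0 then st.1 ++ [st.2] else st.1

def is_valid_arrangement (arrangement : String) (groups : List Int) : Bool :=
  pvFlushA (arrangement.toList.foldl pvStepA ([], 0)) == groups

-- ===== PORT B =====
-- '[i for i, c in enumerate(arrangement) if c == "#"]', enumerate's counter carried explicitly
def pvIdxsFrom : Int → List Char → List Int
  | _, [] => []
  | i, c :: cs => if c = '#' then i :: pvIdxsFrom (i + 1) cs else pvIdxsFrom (i + 1) cs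

-- 'idxs[k]' for indices the loop has already bounds-checked (exact there: pyGet? is some)
def pvGetI (xs : List Int) (i : Int) : Int := (PySem.List.pyGet? xs i).getD 0

-- Source B's for-loop over groups, state = pos; the trailing 'return pos == len(idxs)' is the [] case
def pvCheckB (idxs : List Int) : Int → List Int → Bool
  | pos, [] => pos == (idxs.length : Int)
  | pos, g :: gs =>
    if g ≤ 0 || pos + g > (idxs.length : Int) then false
    else if pvGetI idxs (pos + g - 1) - pvGetI idxs pos != g - 1 then false
    else if pos > 0 && (pvGetI idxs pos - pvGetI idxs (pos - 1) == 1) then false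
    else pvCheckB idxs (pos + g) gs

def is_valid_arrangement_alt (arrangement : String) (groups : List Int) : Bool :=
  pvCheckB (pvIdxsFrom 0 arrangement.toList) 0 groups

-- ===== PRECONDITION & SPEC =====
def Spec_is_valid_arrangement (arrangement : String) (groups : List Int) (out : Bool) : Prop := out = is_valid_arrangement_alt arrangement groups
instance (arrangement : String) (groups : List Int) (out : Bool) : Decidable (Spec_is_valid_arrangement arrangement groups out) := by unfold Spec_is_valid_arrangement; infer_instance

-- ===== CLAIM (what is proved, stated in full; the proofs are below) =====
def Claim_equal_is_valid_arrangement : Prop := ∀ (arrangement : String) (groups : List Int), Dom_is_valid_arrangement arrangement groups → Spec_is_valid_arrangement arrangement groups (is_valid_arrangement arrangement groups)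

-- ===== LEMMAS AND PROOFS =====

-- the '#'-run lengths of cs, with a pending streak s (characterises A's scan)
def pvRuns : List Char → Int → List Int
  | [], s => if s ≠ 0 then [s] else []
  | c :: cs, s => if c = '#' then pvRuns cs (s + 1) else if s ≠ 0 then s :: pvRuns cs 0 else pvRuns cs 0

-- length of the leading '#' run
def pvRunLen : List Char → Nat
  | [] => 0
  | c :: cs => if c = '#' then pvRunLen cs + 1 else 0

-- unfold helpers
theorem pvIdxsFrom_hash (i : Int) (cs : List Char) : pvIdxsFrom i ('#' :: cs) = i :: pvIdxsFrom (i + 1) cs := by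
  simp [pvIdxsFrom]
theorem pvIdxsFrom_not (i : Int) (c : Char) (cs : List Char) (h : c ≠ '#') :
    pvIdxsFrom i (c :: cs) = pvIdxsFrom (i + 1) cs := by simp [pvIdxsFrom, h]
theorem pvRunLen_hash (cs : List Char) : pvRunLen ('#' :: cs) = pvRunLen cs + 1 := by simp [pvRunLen]
theorem pvRunLen_not (c : Char) (cs : List Char) (h : c ≠ '#') : pvRunLen (c :: cs) = 0 := by
  simp [pvRunLen, h]
theorem pvRuns_hash (cs : List Char) (s : Int) : pvRuns ('#' :: cs) s = pvRuns cs (s + 1) := by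
  simp [pvRuns]
theorem pvRuns_not (c : Char) (cs : List Char) (h : c ≠ '#') : pvRuns (c :: cs) 0 = pvRuns cs 0 := by
  simp [pvRuns, h]

theorem pvFoldA_runs (cs : List Char) : ∀ (acc : List Int) (s : Int),
    pvFlushA (List.foldl pvStepA (acc, s) cs) = acc ++ pvRuns cs s := by
  induction cs with
  | nil => intro acc s; simp [pvRuns, pvFlushA]; split_ifs <;> simp
  | cons c cs ih =>
    intro acc s
    by_cases hc : c = '#'
    · simp [List.foldl_cons, pvStepA, hc, pvRuns, ih]
    · by_cases hs : s ≠ 0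
      · simp [List.foldl_cons, pvStepA, hc, hs, pvRuns, ih]
      · simp at hs
        simp [List.foldl_cons, pvStepA, hc, hs, pvRuns, ih]

theorem pvRuns_run (cs : List Char) : ∀ (s : Int), 0 ≤ s →
    pvRuns cs (s + 1) = (s + 1 + (pvRunLen cs : Int)) :: pvRuns (cs.drop (pvRunLen cs)) 0 := by
  induction cs with
  | nil => intro s hs; simp [pvRuns, pvRunLen]; omega
  | cons c cs ih =>
    intro s hs
    by_cases hc : c = '#'
    · subst hc
      have h := ih (s + 1) (by omega)
      rw [pvRuns_hash, pvRunLen_hash, List.drop_succ_cons, h]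
      congr 1
      push_cast; ring
    · have h1 : s + 1 ≠ 0 := by omega
      simp [pvRuns, pvRunLen, hc, h1]

-- pvRuns of a list whose leading run is nonempty
theorem pvRuns_zero (cs : List Char) (hk : pvRunLen cs ≠ 0) :
    pvRuns cs 0 = ((pvRunLen cs : Int)) :: pvRuns (cs.drop (pvRunLen cs)) 0 := by
  cases cs with
  | nil => simp [pvRunLen] at hk
  | cons c cs =>
    by_cases hc : c = '#'
    · subst hc
      have h := pvRuns_run cs 0 le_rfl
      rw [pvRuns_hash, pvRunLen_hash, List.drop_succ_cons, h]
      congr 1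
      push_cast; ring
    · rw [pvRunLen_not c cs hc] at hk
      exact absurd rfl hk

-- after the leading run the next char (if any) is not '#'
theorem pvRunLen_drop (cs : List Char) :
    cs.drop (pvRunLen cs) = [] ∨ ∃ d t, cs.drop (pvRunLen cs) = d :: t ∧ d ≠ '#' := by
  induction cs with
  | nil => left; simp
  | cons c cs ih =>
    by_cases hc : c = '#'
    · subst hc; rw [pvRunLen_hash, List.drop_succ_cons]; exact ih
    · right; exact ⟨c, cs, by rw [pvRunLen_not c cs hc]; simp, hc⟩

theorem pvIdxsFrom_mem_ge (cs : List Char) : ∀ (i x : Int), x ∈ pvIdxsFrom i cs → i ≤ x := by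
  induction cs with
  | nil => intro i x hx; simp [pvIdxsFrom] at hx
  | cons c cs ih =>
    intro i x hx
    by_cases hc : c = '#'
    · subst hc
      rw [pvIdxsFrom_hash, List.mem_cons] at hx
      rcases hx with rfl | hx
      · exact le_rfl
      · have := ih (i + 1) x hx; omega
    · rw [pvIdxsFrom_not i c cs hc] at hx
      have := ih (i + 1) x hx; omega

theorem pvIdxsFrom_len_ge_run (cs : List Char) : ∀ (i : Int), pvRunLen cs ≤ (pvIdxsFrom i cs).length := by
  induction cs with
  | nil => intro i; simp [pvRunLen]
  | cons c cs ih =>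
    intro i
    by_cases hc : c = '#'
    · subst hc
      rw [pvRunLen_hash, pvIdxsFrom_hash, List.length_cons]
      have := ih (i + 1); omega
    · rw [pvRunLen_not c cs hc]; omega

-- inside the leading run, positions are consecutive from i
theorem pvIdxsFrom_getD_hash (cs : List Char) : ∀ (i : Int) (m : Nat), m < pvRunLen cs →
    (pvIdxsFrom i cs).getD m 0 = i + (m : Int) := by
  induction cs with
  | nil => intro i m hm; simp [pvRunLen] at hm
  | cons c cs ih =>
    intro i m hm
    by_cases hc : c = '#'
    · subst hc
      rw [pvIdxsFrom_hash]
      cases m with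
      | zero => simp
      | succ m =>
        rw [pvRunLen_hash] at hm
        have := ih (i + 1) m (by omega)
        rw [List.getD_cons_succ, this]
        push_cast; ring
    · rw [pvRunLen_not c cs hc] at hm; omega

-- every position is at least i + its rank
theorem pvIdxsFrom_ge (cs : List Char) : ∀ (i : Int) (j : Nat), j < (pvIdxsFrom i cs).length →
    i + (j : Int) ≤ (pvIdxsFrom i cs).getD j 0 := by
  induction cs with
  | nil => intro i j h; simp [pvIdxsFrom] at h
  | cons c cs ih =>
    intro i j h
    by_cases hc : c = '#'
    · subst hc
      rw [pvIdxsFrom_hash] at h ⊢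
      cases j with
      | zero => simp
      | succ j =>
        have := ih (i + 1) j (by simpa using h)
        rw [List.getD_cons_succ]
        push_cast at this ⊢
        omega
    · rw [pvIdxsFrom_not i c cs hc] at h ⊢
      have := ih (i + 1) j h
      omega

-- beyond the leading run, a position is strictly larger than i + rank
theorem pvIdxsFrom_gt (cs : List Char) : ∀ (i : Int) (j : Nat), j < (pvIdxsFrom i cs).length →
    pvRunLen cs ≤ j → i + (j : Int) < (pvIdxsFrom i cs).getD j 0 := by
  induction cs with
  | nil => intro i j h; simp [pvIdxsFrom] at h
  | cons c cs ih =>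
    intro i j h hj
    by_cases hc : c = '#'
    · subst hc
      rw [pvRunLen_hash] at hj
      rw [pvIdxsFrom_hash] at h ⊢
      cases j with
      | zero => omega
      | succ j =>
        have := ih (i + 1) j (by simpa using h) (by omega)
        rw [List.getD_cons_succ]
        push_cast at this ⊢
        omega
    · rw [pvIdxsFrom_not i c cs hc] at h ⊢
      have := pvIdxsFrom_ge cs (i + 1) j h
      omega

theorem pvIdxsFrom_drop_hash (cs : List Char) : ∀ (i : Int) (g : Nat), g ≤ pvRunLen cs →
    (pvIdxsFrom i cs).drop g = pvIdxsFrom (i + (g : Int)) (cs.drop g) := by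
  induction cs with
  | nil => intro i g hg; simp [pvRunLen] at hg; simp [hg, pvIdxsFrom]
  | cons c cs ih =>
    intro i g hg
    by_cases hc : c = '#'
    · subst hc
      rw [pvRunLen_hash] at hg
      cases g with
      | zero => simp
      | succ g =>
        have h := ih (i + 1) g (by omega)
        rw [pvIdxsFrom_hash, List.drop_succ_cons, List.drop_succ_cons, h]
        congr 1
        push_cast; ring
    · rw [pvRunLen_not c cs hc] at hg
      have : g = 0 := by omega
      subst this
      simp

theorem pvRunLen_drop_sub (cs : List Char) : ∀ (g : Nat), g ≤ pvRunLen cs →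
    pvRunLen (cs.drop g) = pvRunLen cs - g := by
  induction cs with
  | nil => intro g hg; simp [pvRunLen] at hg; simp [hg, pvRunLen]
  | cons c cs ih =>
    intro g hg
    by_cases hc : c = '#'
    · subst hc
      rw [pvRunLen_hash] at hg ⊢
      cases g with
      | zero => simp [pvRunLen_hash]
      | succ g =>
        rw [List.drop_succ_cons, ih g (by omega)]
        omega
    · rw [pvRunLen_not c cs hc] at hg
      have : g = 0 := by omega
      subst this
      simp [pvRunLen_not c cs hc]

-- proof-side reformulation of Source B's loop: state = (last consumed position?, remaining positions)
def pvAdj : Option Int → Int → Bool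
  | none, _ => false
  | some l', x => x - l' == 1

def pvAux : Option Int → List Int → List Int → Bool
  | _, rest, [] => rest.isEmpty
  | l, rest, g :: gs =>
    if g ≤ 0 ∨ (rest.length : Int) < g then false
    else if rest.getD (g.toNat - 1) 0 - rest.getD 0 0 ≠ g - 1 then false
    else if pvAdj l (rest.getD 0 0) then false
    else pvAux (some (rest.getD (g.toNat - 1) 0)) (rest.drop g.toNat) gs

theorem pvAux_empty_cons (l : Option Int) (g : Int) (gs : List Int) :
    pvAux l [] (g :: gs) = false := by
  simp only [pvAux]
  rw [if_pos]
  simp only [List.length_nil, Nat.cast_zero]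
  omega

-- a group that starts adjacent to the last consumed position can never succeed
theorem pvAux_adj_false (l' x : Int) (rest gs : List Int) (hx : x - l' = 1) :
    pvAux (some l') (x :: rest) gs = false := by
  cases gs with
  | nil => simp [pvAux]
  | cons g gs =>
    simp only [pvAux, List.getD_cons_zero]
    have hA : pvAdj (some l') x = true := by simp [pvAdj, hx]
    rw [hA]
    split_ifs with h1 h2 h3
    · rfl
    · rfl
    · rfl
    · simp at h3

-- in-range int indexing in pvCheckB is plain list indexing
theorem pvGetI_append (pre rest : List Int) (k : Nat) (hk : k < rest.length) :
    pvGetI (pre ++ rest) ((pre.length : Int) + (k : Int)) = rest.getD k 0 := by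
  have h1 : (pre.length : Int) + (k : Int) = ((pre.length + k : Nat) : Int) := by push_cast; ring
  rw [h1, pvGetI, PySem.List.pyGet?_natCast,
    List.getElem?_append_right (by omega : pre.length ≤ pre.length + k),
    show pre.length + k - pre.length = k by omega,
    List.getElem?_eq_getElem hk, List.getD_eq_getElem?_getD, List.getElem?_eq_getElem hk]

theorem pvGetI_last (pre rest : List Int) (h : pre ≠ []) :
    pvGetI (pre ++ rest) ((pre.length : Int) - 1) = pre.getD (pre.length - 1) 0 := by
  have hlen : 1 ≤ pre.length := List.length_pos_iff.mpr h
  have h1 : (pre.length : Int) - 1 = ((pre.length - 1 : Nat) : Int) := by push_cast; omega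
  rw [h1, pvGetI, PySem.List.pyGet?_natCast,
    List.getElem?_append_left (by omega : pre.length - 1 < pre.length),
    List.getD_eq_getElem?_getD]

-- bridge: pvCheckB with cursor pos = pre.length equals pvAux on the suffix
theorem pvCheckB_bridge : ∀ (gs pre rest : List Int),
    pvCheckB (pre ++ rest) ((pre.length : Int)) gs = pvAux pre.getLast? rest gs := by
  intro gs
  induction gs with
  | nil =>
    intro pre rest
    simp only [pvCheckB, pvAux, List.length_append, Nat.cast_add]
    by_cases h : rest = []
    · subst h; simp
    · have hr : 0 < rest.length := List.length_pos_iff.mpr h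
      have h1 : ((pre.length : Int) == ((pre.length : Int) + (rest.length : Int))) = false := by
        simp only [beq_eq_false_iff_ne, ne_eq]
        omega
      rw [h1]
      simp [List.isEmpty_iff, h]
  | cons g gs ih =>
    intro pre rest
    by_cases hg : g ≤ 0 ∨ (rest.length : Int) < g
    · have hg' : (g ≤ 0 || (pre.length : Int) + g > (((pre ++ rest).length : Nat) : Int)) = true := by
        simp only [List.length_append, Bool.or_eq_true, decide_eq_true_eq, gt_iff_lt]
        push_cast
        omega
      simp only [pvCheckB, pvAux, hg', if_true, if_pos hg]
    · push_neg at hg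
      obtain ⟨hg1, hg2⟩ := hg
      have hgn1 : 1 ≤ g.toNat := by omega
      have hgn2 : g.toNat ≤ rest.length := by omega
      have hC1 : (g ≤ 0 || (pre.length : Int) + g > (((pre ++ rest).length : Nat) : Int)) = false := by
        simp only [List.length_append, Bool.or_eq_false_iff, decide_eq_false_iff_not, not_le, gt_iff_lt, not_lt]
        constructor
        · omega
        · push_cast; omega
      have e2 : pvGetI (pre ++ rest) ((pre.length : Int) + g - 1) = rest.getD (g.toNat - 1) 0 := by
        have h1 : (pre.length : Int) + g - 1 = (pre.length : Int) + ((g.toNat - 1 : Nat) : Int) := by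
          push_cast; omega
        rw [h1, pvGetI_append _ _ _ (by omega)]
      have e3 : pvGetI (pre ++ rest) ((pre.length : Int)) = rest.getD 0 0 := by
        have h1 : (pre.length : Int) = (pre.length : Int) + ((0 : Nat) : Int) := by simp
        rw [h1, pvGetI_append _ _ _ (by omega)]
      simp only [pvCheckB, pvAux, hC1, Bool.false_eq_true, if_false,
        if_neg (by omega : ¬ (g ≤ 0 ∨ (rest.length : Int) < g)), e2, e3]
      by_cases hcv : rest.getD (g.toNat - 1) 0 - rest.getD 0 0 = g - 1
      case neg =>
        have hb : (rest.getD (g.toNat - 1) 0 - rest.getD 0 0 != g - 1) = true := by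
          simpa [bne_iff_ne] using hcv
        rw [if_pos hb, if_pos hcv]
      case pos =>
        have hb : (rest.getD (g.toNat - 1) 0 - rest.getD 0 0 != g - 1) = false :=
          bne_eq_false_iff_eq.mpr hcv
        have hnb : ¬ (rest.getD (g.toNat - 1) 0 - rest.getD 0 0 ≠ g - 1) := by omega
        simp only [hb, Bool.false_eq_true, if_false, if_neg hnb]
        have hadj : (decide ((pre.length : Int) > 0) && (rest.getD 0 0 - pvGetI (pre ++ rest) ((pre.length : Int) - 1) == 1)) = pvAdj pre.getLast? (rest.getD 0 0) := by
          by_cases hp : pre = []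
          · subst hp; simp [pvAdj]
          · have hlen : 1 ≤ pre.length := List.length_pos_iff.mpr hp
            have hgl : pre.getLast? = some (pre.getD (pre.length - 1) 0) := by
              rw [List.getLast?_eq_getElem?,
                List.getElem?_eq_getElem (by omega : pre.length - 1 < pre.length),
                List.getD_eq_getElem?_getD,
                List.getElem?_eq_getElem (by omega : pre.length - 1 < pre.length)]
              rfl
            rw [pvGetI_last _ _ hp, hgl,
              decide_eq_true (by exact_mod_cast hlen : (0 : Int) < (pre.length : Int)),
              Bool.true_and]
            simp [pvAdj]
        rw [hadj]
        by_cases ha : pvAdj pre.getLast? (rest.getD 0 0) = true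
        · rw [ha, if_pos rfl, if_pos rfl]
        · simp only [Bool.not_eq_true] at ha
          rw [ha]
          simp only [Bool.false_eq_true, if_false]
          have e4 : (pre.length : Int) + g = (((pre ++ rest.take g.toNat).length : Nat) : Int) := by
            simp only [List.length_append, List.length_take]
            push_cast
            omega
          have e5 : pre ++ rest = (pre ++ rest.take g.toNat) ++ rest.drop g.toNat := by
            simp
          have e6 : (pre ++ rest.take g.toNat).getLast? = some (rest.getD (g.toNat - 1) 0) := by
            have htk : rest.take g.toNat ≠ [] := by
              simp only [ne_eq, List.take_eq_nil_iff]
              push_neg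
              constructor
              · omega
              · intro hr; rw [hr] at hgn2; simp at hgn2; omega
            have hlt : (rest.take g.toNat).length = g.toNat := by
              rw [List.length_take]; omega
            rw [List.getLast?_eq_getElem?, List.length_append, hlt,
              List.getElem?_append_right (by omega : pre.length ≤ pre.length + g.toNat - 1),
              show pre.length + g.toNat - 1 - pre.length = g.toNat - 1 by omega,
              List.getElem?_take_of_lt (by omega : g.toNat - 1 < g.toNat),
              List.getElem?_eq_getElem (by omega : g.toNat - 1 < rest.length),
              List.getD_eq_getElem?_getD,
              List.getElem?_eq_getElem (by omega : g.toNat - 1 < rest.length)]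
            rfl
          rw [e4, e5, ih (pre ++ rest.take g.toNat) (rest.drop g.toNat), e6]

-- the main characterisation: B's group-driven check accepts exactly the run-length list
theorem pvAux_main : ∀ (n : Nat) (cs : List Char), cs.length ≤ n → ∀ (gs : List Int) (i : Int) (l : Option Int),
    (∀ l', l = some l' → ∀ x ∈ pvIdxsFrom i cs, l' + 1 < x) →
    (pvAux l (pvIdxsFrom i cs) gs = true ↔ gs = pvRuns cs 0) := by
  intro n
  induction n with
  | zero =>
    intro cs hn gs i l _
    have hcs : cs = [] := by cases cs <;> simp_all
    subst hcs
    cases gs with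
    | nil => simp [pvAux, pvIdxsFrom, pvRuns]
    | cons g gs => simp [pvAux_empty_cons, pvIdxsFrom, pvRuns]
  | succ n ih =>
    intro cs hn gs i l hsep
    cases cs with
    | nil =>
      cases gs with
      | nil => simp [pvAux, pvIdxsFrom, pvRuns]
      | cons g gs => simp [pvAux_empty_cons, pvIdxsFrom, pvRuns]
    | cons c cs =>
      by_cases hc : c = '#'
      case neg =>
        rw [pvIdxsFrom_not i c cs hc, pvRuns_not c cs hc]
        apply ih cs (by simpa using hn) gs (i + 1) l
        intro l' hl x hx
        exact hsep l' hl x (by rwa [pvIdxsFrom_not i c cs hc])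
      case pos =>
        subst hc
        set L := pvIdxsFrom i ('#' :: cs) with hL
        set k := pvRunLen ('#' :: cs) with hkdef
        have hk1 : 1 ≤ k := by rw [hkdef, pvRunLen_hash]; omega
        have hlen : k ≤ L.length := pvIdxsFrom_len_ge_run ('#' :: cs) i
        have hL0 : L.getD 0 0 = i := by
          simpa using pvIdxsFrom_getD_hash ('#' :: cs) i 0 (by omega)
        have hruns : pvRuns ('#' :: cs) 0 = ((k : Int)) :: pvRuns (('#' :: cs).drop k) 0 :=
          pvRuns_zero _ (by omega)
        have hmem0 : i ∈ L := by
          have h0 : 0 < L.length := by omega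
          have hm : L.getD 0 0 ∈ L := by
            rw [List.getD_eq_getElem L 0 h0]
            exact L.getElem_mem h0
          rwa [hL0] at hm
        have hadjF : pvAdj l (L.getD 0 0) = false := by
          cases l with
          | none => simp [pvAdj]
          | some l' =>
            have := hsep l' rfl i hmem0
            simp only [pvAdj, hL0, beq_eq_false_iff_ne, ne_eq]
            omega
        cases gs with
        | nil =>
          have hne : ¬ L.isEmpty := by
            simp only [List.isEmpty_iff, ← List.length_eq_zero_iff]
            omega
          rw [hruns]
          simp only [pvAux]
          simp [hne]
        | cons g gs =>
          rw [hruns]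
          by_cases hg : g ≤ 0 ∨ (L.length : Int) < g
          · simp only [pvAux, if_pos hg, Bool.false_eq_true, false_iff]
            intro hcon
            injection hcon with hg' _
            omega
          · push_neg at hg
            obtain ⟨hg1, hg2⟩ := hg
            have hgn1 : 1 ≤ g.toNat := by omega
            have hgn2 : g.toNat ≤ L.length := by omega
            by_cases hgk : g = (k : Int)
            · -- group matches the full leading run: consume it and recurse
              have hgtk : g.toNat = k := by omega
              have hd1 : L.getD (g.toNat - 1) 0 = i + ((k - 1 : Nat) : Int) := by
                rw [hgtk]
                exact pvIdxsFrom_getD_hash ('#' :: cs) i (k - 1) (by omega)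
              have hcons : ¬ (L.getD (g.toNat - 1) 0 - L.getD 0 0 ≠ g - 1) := by
                rw [hd1, hL0, hgk]
                push_cast
                omega
              have hdrop : L.drop g.toNat = pvIdxsFrom (i + (k : Int)) (('#' :: cs).drop k) := by
                rw [hgtk]
                exact pvIdxsFrom_drop_hash ('#' :: cs) i k le_rfl
              have hsep2 : ∀ l', some (L.getD (g.toNat - 1) 0) = some l' →
                  ∀ x ∈ pvIdxsFrom (i + (k : Int)) (('#' :: cs).drop k), l' + 1 < x := by
                intro l' hl' x hx
                injection hl' with hl'
                subst hl'
                rw [hd1]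
                rcases pvRunLen_drop ('#' :: cs) with hnil | ⟨d, t, hdt, hdne⟩
                · rw [← hkdef] at hnil
                  rw [hnil] at hx
                  simp [pvIdxsFrom] at hx
                · rw [← hkdef] at hdt
                  rw [hdt, pvIdxsFrom_not _ d t hdne] at hx
                  have := pvIdxsFrom_mem_ge t (i + (k : Int) + 1) x hx
                  push_cast
                  omega
              have hlen' : (('#' :: cs).drop k).length ≤ n := by
                simp only [List.length_drop, List.length_cons]
                simp only [List.length_cons] at hn
                omega
              simp only [pvAux, if_neg (by omega : ¬ (g ≤ 0 ∨ (L.length : Int) < g)),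
                if_neg hcons, hadjF, Bool.false_eq_true, if_false, hdrop]
              rw [ih (('#' :: cs).drop k) hlen' gs (i + (k : Int)) (some (L.getD (g.toNat - 1) 0)) hsep2]
              simp [List.cons.injEq, hgk]
            · -- group does not match the run length: both sides are false
              rw [iff_false_intro (fun hcon : g :: gs = (k : Int) :: pvRuns (('#' :: cs).drop k) 0 => by
                injection hcon with hg' _; exact hgk hg')]
              simp only [iff_false, Bool.not_eq_true]
              by_cases hglt : g.toNat < k
              · -- g shorter than the run: next group would start adjacent
                have hcons : ¬ (L.getD (g.toNat - 1) 0 - L.getD 0 0 ≠ g - 1) := by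
                  rw [pvIdxsFrom_getD_hash ('#' :: cs) i (g.toNat - 1) (by omega), hL0]
                  push_cast
                  omega
                simp only [pvAux, if_neg (by omega : ¬ (g ≤ 0 ∨ (L.length : Int) < g)),
                  if_neg hcons, hadjF, Bool.false_eq_true, if_false]
                have hdrop : L.drop g.toNat = pvIdxsFrom (i + (g.toNat : Int)) (('#' :: cs).drop g.toNat) :=
                  pvIdxsFrom_drop_hash ('#' :: cs) i g.toNat (by omega)
                have hrun' : 1 ≤ pvRunLen (('#' :: cs).drop g.toNat) := by
                  rw [pvRunLen_drop_sub ('#' :: cs) g.toNat (by omega)]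
                  omega
                have hne : L.drop g.toNat ≠ [] := by
                  rw [hdrop]
                  intro hcontra
                  have hge := pvIdxsFrom_len_ge_run (('#' :: cs).drop g.toNat) (i + (g.toNat : Int))
                  rw [hcontra] at hge
                  simp at hge
                  omega
                obtain ⟨x, rest', hxr⟩ := List.exists_cons_of_ne_nil hne
                have hx0 : x = i + (g.toNat : Int) := by
                  have hh : (L.drop g.toNat).getD 0 0 = i + (g.toNat : Int) + ((0 : Nat) : Int) := by
                    rw [hdrop]
                    exact pvIdxsFrom_getD_hash _ _ 0 (by omega)
                  rw [hxr] at hh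
                  simpa using hh
                rw [hxr]
                apply pvAux_adj_false
                rw [pvIdxsFrom_getD_hash ('#' :: cs) i (g.toNat - 1) (by omega), hx0]
                push_cast
                omega
              · -- g longer than the run: consecutiveness fails across the gap
                have hjlt : g.toNat - 1 < L.length := by omega
                have hgt : i + ((g.toNat - 1 : Nat) : Int) < L.getD (g.toNat - 1) 0 :=
                  pvIdxsFrom_gt ('#' :: cs) i (g.toNat - 1) hjlt (by omega)
                have hcons : L.getD (g.toNat - 1) 0 - L.getD 0 0 ≠ g - 1 := by
                  rw [hL0]
                  push_cast at hgt ⊢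
                  omega
                simp only [pvAux, if_neg (by omega : ¬ (g ≤ 0 ∨ (L.length : Int) < g)), if_pos hcons]

-- ===== VERDICT (by name: the statement is the Claim_ definition above) =====
theorem is_valid_arrangement_spec : Claim_equal_is_valid_arrangement := by
  intro arrangement groups _
  unfold Spec_is_valid_arrangement is_valid_arrangement is_valid_arrangement_alt
  have hB : pvCheckB (pvIdxsFrom 0 arrangement.toList) 0 groups
      = pvAux none (pvIdxsFrom 0 arrangement.toList) groups := by
    have h := pvCheckB_bridge groups [] (pvIdxsFrom 0 arrangement.toList)
    simpa using h
  rw [hB, Bool.eq_iff_iff, pvFoldA_runs arrangement.toList [] 0]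
  rw [pvAux_main arrangement.toList.length arrangement.toList le_rfl groups 0 none
    (by intro l' hl'; exact absurd hl' (by simp))]
  simp only [List.nil_append, beq_iff_eq]
  exact eq_comm
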